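-- pv_equiv track=rewrite | github.com/BrianMills2718/autocoder_2025.09 | autocoder_cc/blueprint_language/ast_self_healing.py | _attempt_syntax_cleanup
-- ===== SOURCE A (Python) =====
-- def _attempt_syntax_cleanup(source_code: str) -> str:
--     """Attempt to fix basic syntax issues in source code"""
--
--     lines = source_code.split('\n')
--     cleaned_lines = []
--
--     for line in lines:
--         # Fix common syntax issues
--         cleaned_line = line
--
--         # Fix indentation issues (basic)
--         if cleaned_line.strip() and not cleaned_line.startswith(' ') and not cleaned_line.startswith('\t'):
--             if any(keyword in cleaned_line for keyword in ['def ', 'class ', 'if ', 'for ', 'while ', 'try:', 'except']):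
--                 # This should probably be indented
--                 if len(cleaned_lines) > 0 and cleaned_lines[-1].strip().endswith(':'):
--                     cleaned_line = '    ' + cleaned_line
--
--         # Fix missing colons (basic detection)
--         if any(pattern in cleaned_line for pattern in ['def ', 'class ', 'if ', 'for ', 'while ', 'try', 'except']):
--             if not cleaned_line.rstrip().endswith(':') and not cleaned_line.rstrip().endswith('...'):
--                 cleaned_line = cleaned_line.rstrip() + ':'
--
--         cleaned_lines.append(cleaned_line)
--
--     return '\n'.join(cleaned_lines)
-- ===== SOURCE B (Python) =====
-- def _attempt_syntax_cleanup(source_code: str) -> str: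
--     """Attempt to fix basic syntax issues in source code"""
--     colon_kws = ['def ', 'class ', 'if ', 'for ', 'while ', 'try', 'except']
--     indent_kws = ['def ', 'class ', 'if ', 'for ', 'while ', 'try:', 'except']
--
--     raw = source_code.split('\n')
--     # Pass 1: apply the missing-colon rule to every raw line independently.
--     fixed = [line.rstrip() + ':'
--              if (any(k in line for k in colon_kws)
--                  and not line.rstrip().endswith(':')
--                  and not line.rstrip().endswith('...'))
--              else line
--              for line in raw]
--     # Pass 2: decide indentation from the raw line and the previous colon-fixed line.
--     out = []
--     prev = None
--     for line, f in zip(raw, fixed):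
--         out.append('    ' + f
--                    if (prev is not None and line.strip()
--                        and not line.startswith((' ', '\t'))
--                        and any(k in line for k in indent_kws)
--                        and prev.strip().endswith(':'))
--                    else f)
--         prev = f
--     return '\n'.join(out)
-- ===== Notes on version B (the rewrite author's own statement) =====
-- stated objective: alternative
-- what changed: A's single stateful loop (indent using the last cleaned line, then colon-fix, append) is re-decomposed into two passes: first every raw line is colon-fixed independently, then a second pass prepends the indent using the raw line's predicates and the previous colon-fixed line's trailing-colon test.
import Mathlib
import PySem

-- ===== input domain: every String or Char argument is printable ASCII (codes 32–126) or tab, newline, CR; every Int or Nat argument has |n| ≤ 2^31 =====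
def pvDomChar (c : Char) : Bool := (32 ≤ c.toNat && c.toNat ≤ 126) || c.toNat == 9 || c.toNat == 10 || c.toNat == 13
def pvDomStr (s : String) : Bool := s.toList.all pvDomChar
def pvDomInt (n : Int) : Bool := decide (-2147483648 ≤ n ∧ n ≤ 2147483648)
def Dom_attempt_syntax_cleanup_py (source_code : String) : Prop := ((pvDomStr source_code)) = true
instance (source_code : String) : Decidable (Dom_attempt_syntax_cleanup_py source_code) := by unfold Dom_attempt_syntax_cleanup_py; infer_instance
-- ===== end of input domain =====

-- B re-decomposes A's single stateful loop into two passes (colon-fix every line, then indent from the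
-- raw line and the previous colon-fixed line); same return value, objective: alternative decomposition.

-- shared keyword literals (the two list literals of the Python source)
def pvIndentKws : List (List Char) :=
  ["def ".toList, "class ".toList, "if ".toList, "for ".toList, "while ".toList, "try:".toList, "except".toList]
def pvColonKws : List (List Char) :=
  ["def ".toList, "class ".toList, "if ".toList, "for ".toList, "while ".toList, "try".toList, "except".toList]
-- any(keyword in s for keyword in kws)
def pvAnyIn (kws : List (List Char)) (s : List Char) : Bool :=
  kws.any (fun k => PySem.Chars.isIn k s)

-- ===== PORT A =====
def pvStepA (cleaned_lines : List (List Char)) (line : List Char) : List (List Char) :=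
  -- cleaned_line = line; first the indentation block, then the missing-colon block
  let c1 :=
    if !(PySem.Chars.strip line).isEmpty && !PySem.Chars.startswith line " ".toList
        && !PySem.Chars.startswith line "\t".toList then
      if pvAnyIn pvIndentKws line then
        if decide (cleaned_lines.length > 0)
            && PySem.Chars.endswith (PySem.Chars.strip (PySem.List.pyGetD cleaned_lines (-1) [])) ":".toList then
          "    ".toList ++ line
        else line
      else line
    else line
  let c2 :=
    if pvAnyIn pvColonKws c1 then
      if !PySem.Chars.endswith (PySem.Chars.rstrip c1) ":".toList
          && !PySem.Chars.endswith (PySem.Chars.rstrip c1) "...".toList then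
        PySem.Chars.rstrip c1 ++ ":".toList
      else c1
    else c1
  cleaned_lines ++ [c2]

def attempt_syntax_cleanup_py (source_code : String) : String :=
  let lines := PySem.Chars.splitOn source_code.toList "\n".toList
  let cleaned_lines := lines.foldl pvStepA []
  String.mk (PySem.Chars.join "\n".toList cleaned_lines)

-- ===== PORT B =====
-- pass 1: the missing-colon rule applied to one raw line
def pvColonFix (line : List Char) : List Char :=
  if pvAnyIn pvColonKws line
      && !PySem.Chars.endswith (PySem.Chars.rstrip line) ":".toList
      && !PySem.Chars.endswith (PySem.Chars.rstrip line) "...".toList then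
    PySem.Chars.rstrip line ++ ":".toList
  else line

-- pass 2 predicate: raw line tests + the previous colon-fixed line's trailing-colon test
def pvIndentCond (prev : Option (List Char)) (line : List Char) : Bool :=
  match prev with
  | none => false
  | some p =>
      !(PySem.Chars.strip line).isEmpty
        && !(PySem.Chars.startswith line " ".toList || PySem.Chars.startswith line "\t".toList)
        && pvAnyIn pvIndentKws line
        && PySem.Chars.endswith (PySem.Chars.strip p) ":".toList

-- pass 2: walk the (raw, fixed) pairs carrying the previous fixed line
def pvPassB : Option (List Char) → List (List Char × List Char) → List (List Char)
  | _, [] => []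
  | prev, (line, f) :: rest =>
      (if pvIndentCond prev line then "    ".toList ++ f else f) :: pvPassB (some f) rest

def attempt_syntax_cleanup_py_alt (source_code : String) : String :=
  let raw := PySem.Chars.splitOn source_code.toList "\n".toList
  let fixed := raw.map pvColonFix
  String.mk (PySem.Chars.join "\n".toList (pvPassB none (raw.zip fixed)))

-- ===== PRECONDITION & SPEC =====
def Spec_attempt_syntax_cleanup_py (source_code : String) (out : String) : Prop := out = attempt_syntax_cleanup_py_alt source_code
instance (source_code : String) (out : String) : Decidable (Spec_attempt_syntax_cleanup_py source_code out) := by unfold Spec_attempt_syntax_cleanup_py; infer_instance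

-- ===== CLAIM (what is proved, stated in full; the proofs are below) =====
def Claim_equal_attempt_syntax_cleanup_py : Prop := ∀ (source_code : String), Dom_attempt_syntax_cleanup_py source_code → Spec_attempt_syntax_cleanup_py source_code (attempt_syntax_cleanup_py source_code)

-- ===== LEMMAS AND PROOFS =====

-- invariant tying A's accumulator to B's previous colon-fixed line
def pvInv (acc : List (List Char)) (prev : Option (List Char)) : Prop :=
  match prev with
  | none => acc = []
  | some p => acc ≠ [] ∧
      PySem.Chars.strip (PySem.List.pyGetD acc (-1) []) = PySem.Chars.strip p

lemma pvStrip_s4 (x : List Char) :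
    PySem.Chars.strip ("    ".toList ++ x) = PySem.Chars.strip x := by
  have e : "    ".toList = [' ', ' ', ' ', ' '] := rfl
  have hs : PySem.Chars.isspace ' ' = true := by decide
  simp [PySem.Chars.strip, PySem.Chars.lstrip, e, hs]

lemma pvRstrip_ne (x : List Char) (h : PySem.Chars.strip x ≠ []) :
    PySem.Chars.rstrip x ≠ [] := by
  intro hc
  apply h
  have h1 : List.dropWhile PySem.Chars.isspace x.reverse = [] := by
    have := congrArg List.reverse hc
    simpa [PySem.Chars.rstrip] using this
  have h2 : ∀ c ∈ x, PySem.Chars.isspace c = true := by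
    intro c hcx
    exact List.dropWhile_eq_nil_iff.mp h1 c (by simpa using hcx)
  have h3 : PySem.Chars.lstrip x = [] := by
    simp [PySem.Chars.lstrip, List.dropWhile_eq_nil_iff]
    exact h2
  simp [PySem.Chars.strip, h3, PySem.Chars.rstrip]

lemma pvRstrip_s4 (x : List Char) (h : PySem.Chars.rstrip x ≠ []) :
    PySem.Chars.rstrip ("    ".toList ++ x) = "    ".toList ++ PySem.Chars.rstrip x := by
  have e : "    ".toList = [' ', ' ', ' ', ' '] := rfl
  have hne : (List.dropWhile PySem.Chars.isspace x.reverse).isEmpty = false := by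
    rw [List.isEmpty_eq_false_iff]
    intro hc
    exact h (by simp [PySem.Chars.rstrip, hc])
  simp [PySem.Chars.rstrip, e, List.dropWhile_append, hne]

lemma pvInfix_space (k : List Char) (x : List Char) (hk : k.head? ≠ some ' ') :
    k <:+: (' ' :: x) ↔ k <:+: x := by
  constructor
  · intro hin
    rcases List.infix_cons_iff.mp hin with hpre | h2
    · cases k with
      | nil => exact List.nil_infix
      | cons c t =>
        exfalso
        have hc : c = ' ' ∧ t <+: x := by simpa using hpre
        exact hk (by simp [hc.1])
    · exact h2
  · intro h
    exact h.trans (List.suffix_cons ' ' x).isInfix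

lemma pvIsIn_s4 (k x : List Char) (hk : k.head? ≠ some ' ') :
    PySem.Chars.isIn k ("    ".toList ++ x) = PySem.Chars.isIn k x := by
  have e : "    ".toList ++ x = ' ' :: ' ' :: ' ' :: ' ' :: x := rfl
  rw [e, Bool.eq_iff_iff, PySem.Chars.isIn_iff_infix, PySem.Chars.isIn_iff_infix,
    pvInfix_space k _ hk, pvInfix_space k _ hk, pvInfix_space k _ hk, pvInfix_space k _ hk]

lemma pvAnyIn_colon_s4 (x : List Char) :
    pvAnyIn pvColonKws ("    ".toList ++ x) = pvAnyIn pvColonKws x := by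
  simp only [pvAnyIn, pvColonKws, List.any_cons, List.any_nil]
  rw [pvIsIn_s4 "def ".toList x (by decide), pvIsIn_s4 "class ".toList x (by decide),
    pvIsIn_s4 "if ".toList x (by decide), pvIsIn_s4 "for ".toList x (by decide),
    pvIsIn_s4 "while ".toList x (by decide), pvIsIn_s4 "try".toList x (by decide),
    pvIsIn_s4 "except".toList x (by decide)]

lemma pvSuffix_space (p r : List Char) (hp : ' ' ∉ p) :
    p <:+ (' ' :: r) ↔ p <:+ r := by
  constructor
  · intro hin
    rcases List.suffix_cons_iff.mp hin with h1 | h2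
    · exact absurd (by simp [h1] : (' ' : Char) ∈ p) hp
    · exact h2
  · intro h
    exact h.trans (List.suffix_cons ' ' r)

lemma pvEndswith_s4 (p r : List Char) (hp : ' ' ∉ p) :
    PySem.Chars.endswith ("    ".toList ++ r) p = PySem.Chars.endswith r p := by
  have e : "    ".toList ++ r = ' ' :: ' ' :: ' ' :: ' ' :: r := rfl
  rw [e, Bool.eq_iff_iff, PySem.Chars.endswith_iff, PySem.Chars.endswith_iff,
    pvSuffix_space p _ hp, pvSuffix_space p _ hp, pvSuffix_space p _ hp, pvSuffix_space p _ hp]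

-- the colon block commutes with the '    ' prefix on a line with nonempty strip
lemma pvColonFix_s4 (line : List Char) (h : PySem.Chars.strip line ≠ []) :
    pvColonFix ("    ".toList ++ line) = "    ".toList ++ pvColonFix line := by
  have hr := pvRstrip_ne line h
  unfold pvColonFix
  rw [pvAnyIn_colon_s4, pvRstrip_s4 line hr,
    pvEndswith_s4 ":".toList _ (by decide), pvEndswith_s4 "...".toList _ (by decide)]
  split_ifs with h1 <;> simp

-- A's second block computes pvColonFix
lemma pvSecond_eq (c : List Char) :
    (if pvAnyIn pvColonKws c then
      if !PySem.Chars.endswith (PySem.Chars.rstrip c) ":".toList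
          && !PySem.Chars.endswith (PySem.Chars.rstrip c) "...".toList then
        PySem.Chars.rstrip c ++ ":".toList
      else c
    else c) = pvColonFix c := by
  unfold pvColonFix
  cases hA : pvAnyIn pvColonKws c <;>
    cases hB : PySem.Chars.endswith (PySem.Chars.rstrip c) ":".toList <;>
      cases hC : PySem.Chars.endswith (PySem.Chars.rstrip c) "...".toList <;>
        simp

lemma pvStepA_eq (acc : List (List Char)) (line : List Char) (prev : Option (List Char))
    (h : pvInv acc prev) :
    pvStepA acc line =
      acc ++ [if pvIndentCond prev line then "    ".toList ++ pvColonFix line else pvColonFix line] := by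
  unfold pvStepA pvIndentCond
  dsimp only
  cases prev with
  | none =>
    have hacc : acc = [] := h
    subst hacc
    have e0 : (decide ((([] : List (List Char))).length > 0) &&
        PySem.Chars.endswith (PySem.Chars.strip (PySem.List.pyGetD ([] : List (List Char)) (-1) []))
          ":".toList) = false := by decide
    rw [e0]
    simp only [Bool.false_eq_true, if_false, ite_self, pvSecond_eq]
  | some p =>
    obtain ⟨hne, hstrip⟩ := h
    have hlen : decide (acc.length > 0) = true := by
      simp [List.length_pos_iff]
      exact hne
    rw [pvSecond_eq, hstrip, hlen]
    cases h1 : (PySem.Chars.strip line).isEmpty <;>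
      cases h2 : PySem.Chars.startswith line " ".toList <;>
        cases h3 : PySem.Chars.startswith line "\t".toList <;>
          cases h4 : pvAnyIn pvIndentKws line <;>
            cases h5 : PySem.Chars.endswith (PySem.Chars.strip p) ":".toList <;>
              simp
    all_goals try
      (intro hx
       rw [show PySem.Chars.endswith (PySem.Chars.strip p) [':'] = false from h5] at hx
       exact absurd hx Bool.false_ne_true)
    all_goals
      rw [if_pos (show PySem.Chars.endswith (PySem.Chars.strip p) [':'] = true from h5)]
      exact pvColonFix_s4 line (List.isEmpty_eq_false_iff.mp h1)

lemma pvFold_eq (raw : List (List Char)) : ∀ (acc : List (List Char)) (prev : Option (List Char)),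
    pvInv acc prev →
    raw.foldl pvStepA acc = acc ++ pvPassB prev (raw.zip (raw.map pvColonFix)) := by
  induction raw with
  | nil =>
    intro acc prev _
    simp [pvPassB]
  | cons line rest ih =>
    intro acc prev h
    rw [List.foldl_cons, pvStepA_eq acc line prev h, List.map_cons, List.zip_cons_cons]
    simp only [pvPassB]
    rw [ih (acc ++ [if pvIndentCond prev line then "    ".toList ++ pvColonFix line else pvColonFix line])
        (some (pvColonFix line)) ?_]
    · simp
    · refine ⟨by simp, ?_⟩
      rw [PySem.List.pyGetD_neg_one_append_singleton]
      split_ifs with hi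
      · exact pvStrip_s4 (pvColonFix line)
      · rfl

-- ===== VERDICT (by name: the statement is the Claim_ definition above) =====
theorem attempt_syntax_cleanup_py_spec : Claim_equal_attempt_syntax_cleanup_py := by
  intro s _
  unfold Spec_attempt_syntax_cleanup_py
  simp only [attempt_syntax_cleanup_py, attempt_syntax_cleanup_py_alt]
  rw [pvFold_eq _ [] none (by simp [pvInv])]
  rfl
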